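-- pv_equiv track=rewrite | github.com/dima1203oleg/predator-analytics | libs/core/security/rbac.py | verify_role
-- ===== SOURCE A (Python) =====
-- from enum import Enum
-- from typing import List, Dict, Union
--
-- class Role(str, Enum):
--     ADMIN = "admin"           # Full access
--     ANALYST = "analyst"       # Can run operations and analyses
--     VIEWER = "viewer"         # Read-only
--     SYSTEM = "system"         # Internal services / God mode
--     BOT = "bot"               # Automated agents
--
-- def verify_role(user_roles: List[Union[str, Role]], required_role: Role) -> bool:
--     """
--     Check if the user has the specific role (or implies it, hierarchically).
--     Simple implementation: exact match or admin.
--     """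
--     normalized_roles = []
--     for r in user_roles:
--         try:
--             normalized_roles.append(Role(r) if isinstance(r, str) else r)
--         except ValueError:
--             continue
--
--     if Role.ADMIN in normalized_roles or Role.SYSTEM in normalized_roles:
--         return True
--
--     return required_role in normalized_roles
-- ===== SOURCE B (Python) =====
-- from enum import Enum
-- from typing import List, Union
--
-- class Role(str, Enum):
--     ADMIN = "admin"
--     ANALYST = "analyst"
--     VIEWER = "viewer"
--     SYSTEM = "system"
--     BOT = "bot"
--
-- def verify_role(user_roles: List[Union[str, Role]], required_role: Role) -> bool:
--     """Single pass with early exit: no intermediate normalized list."""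
--     for r in user_roles:
--         try:
--             role = Role(r) if isinstance(r, str) else r
--         except ValueError:
--             continue
--         if role in (Role.ADMIN, Role.SYSTEM, required_role):
--             return True
--     return False
-- ===== Notes on version B (the rewrite author's own statement) =====
-- stated objective: simpler
-- what changed: B fuses A's normalization loop plus two subsequent membership scans into a single traversal with early exit and no intermediate list.
import Mathlib
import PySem

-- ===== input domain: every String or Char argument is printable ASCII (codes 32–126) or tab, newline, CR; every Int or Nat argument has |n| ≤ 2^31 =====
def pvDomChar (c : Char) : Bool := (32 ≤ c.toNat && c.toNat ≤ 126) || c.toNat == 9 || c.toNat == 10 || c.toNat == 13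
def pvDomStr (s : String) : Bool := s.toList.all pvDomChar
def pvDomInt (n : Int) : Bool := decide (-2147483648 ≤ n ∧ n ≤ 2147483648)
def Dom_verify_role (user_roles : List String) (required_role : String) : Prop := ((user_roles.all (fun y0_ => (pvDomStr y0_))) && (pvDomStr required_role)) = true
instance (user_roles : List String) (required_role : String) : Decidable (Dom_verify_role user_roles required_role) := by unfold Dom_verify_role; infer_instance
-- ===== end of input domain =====

-- B fuses A's normalization loop + two membership scans into one early-exit traversal (objective: simpler).

-- ===== PORT A =====
-- Role(r) succeeds exactly on these five value strings (ValueError otherwise).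
def isRoleStr (r : String) : Bool :=
  r == "admin" || r == "analyst" || r == "viewer" || r == "system" || r == "bot"

def verify_role (user_roles : List String) (required_role : String) : Bool :=
  let normalized_roles :=
    user_roles.foldl (fun acc r => if isRoleStr r then acc ++ [r] else acc) []
  if normalized_roles.contains "admin" || normalized_roles.contains "system" then
    true
  else
    normalized_roles.contains required_role

-- ===== PORT B =====
def verify_role_alt (user_roles : List String) (required_role : String) : Bool :=
  match user_roles with
  | [] => false
  | r :: rs =>
    if isRoleStr r then
      if r == "admin" || r == "system" || r == required_role then true
      else verify_role_alt rs required_role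
    else verify_role_alt rs required_role

-- ===== PRECONDITION & SPEC =====
def Spec_verify_role (user_roles : List String) (required_role : String) (out : Bool) : Prop := out = verify_role_alt user_roles required_role
instance (user_roles : List String) (required_role : String) (out : Bool) : Decidable (Spec_verify_role user_roles required_role out) := by unfold Spec_verify_role; infer_instance

-- ===== CLAIM (what is proved, stated in full; the proofs are below) =====
def Claim_equal_verify_role : Prop := ∀ (user_roles : List String) (required_role : String), Dom_verify_role user_roles required_role → Spec_verify_role user_roles required_role (verify_role user_roles required_role)

-- ===== LEMMAS AND PROOFS =====

theorem foldl_append_filter (l : List String) (acc : List String) :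
    l.foldl (fun acc r => if isRoleStr r then acc ++ [r] else acc) acc
      = acc ++ l.filter isRoleStr := by
  induction l generalizing acc with
  | nil => simp
  | cons r rs ih =>
    simp only [List.foldl_cons, List.filter_cons]
    by_cases h : isRoleStr r <;> simp [h, ih]

theorem alt_eq_filter (l : List String) (req : String) :
    verify_role_alt l req =
      ((l.filter isRoleStr).contains "admin" || (l.filter isRoleStr).contains "system"
        || (l.filter isRoleStr).contains req) := by
  induction l with
  | nil => simp [verify_role_alt]
  | cons r rs ih =>
    simp only [verify_role_alt, List.filter_cons]
    by_cases h : isRoleStr r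
    · by_cases h2 : (r == "admin" || r == "system" || r == req) = true
      · rcases Bool.or_eq_true_iff.mp h2 with h3 | h3
        · rcases Bool.or_eq_true_iff.mp h3 with h4 | h4 <;> simp_all
        · simp_all
      · simp only [Bool.or_eq_true, not_or] at h2
        obtain ⟨⟨ha, hs⟩, hr⟩ := h2
        simp only [beq_iff_eq] at ha hs hr
        simp [h, ih, List.contains_cons, ha, hs, hr, Ne.symm ha, Ne.symm hs, Ne.symm hr]
    · simp [h, ih]

-- ===== VERDICT (by name: the statement is the Claim_ definition above) =====
theorem verify_role_spec : Claim_equal_verify_role := by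
  intro user_roles required_role _
  unfold Spec_verify_role verify_role
  rw [alt_eq_filter, foldl_append_filter]
  simp only [List.nil_append]
  by_cases h : ((user_roles.filter isRoleStr).contains "admin"
      || (user_roles.filter isRoleStr).contains "system") = true <;>
    simp_all
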